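-- pv_equiv track=rewrite | github.com/krisskrosscode/Python_practice_projects | iNeuron_py_ass/adv_ass_01.py | check_score
-- ===== SOURCE A (Python) =====
-- def check_score(lst):
--     sum = 0
--     for i in lst:
--         for j in i:
--             if j == "#":
--                 sum += 5
--             elif j == 'O':
--                 sum += 3
--             elif j == "X":
--                 sum += 1
--             elif j == '!':
--                 sum -= 1
--             elif j == "!!":
--                 sum -= 3
--             elif  j == "!!!":
--                 sum -= 5
--     if sum < 0:
--         return 0
--     return sum
-- ===== SOURCE B (Python) =====
-- def check_score(lst):
--     flat = [j for i in lst for j in i]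
--     weights = {'#': 5, 'O': 3, 'X': 1, '!': -1, '!!': -3, '!!!': -5}
--     total = sum(w * flat.count(s) for s, w in weights.items())
--     return max(total, 0)
-- ===== Notes on version B (the rewrite author's own statement) =====
-- stated objective: alternative
-- what changed: B flattens the nested list once and then makes one counting pass per symbol over a fixed weights table (total = sum of weight*count), instead of A's per-element if/elif chain inside nested loops; the final clamp is max(total, 0).
import Mathlib
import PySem

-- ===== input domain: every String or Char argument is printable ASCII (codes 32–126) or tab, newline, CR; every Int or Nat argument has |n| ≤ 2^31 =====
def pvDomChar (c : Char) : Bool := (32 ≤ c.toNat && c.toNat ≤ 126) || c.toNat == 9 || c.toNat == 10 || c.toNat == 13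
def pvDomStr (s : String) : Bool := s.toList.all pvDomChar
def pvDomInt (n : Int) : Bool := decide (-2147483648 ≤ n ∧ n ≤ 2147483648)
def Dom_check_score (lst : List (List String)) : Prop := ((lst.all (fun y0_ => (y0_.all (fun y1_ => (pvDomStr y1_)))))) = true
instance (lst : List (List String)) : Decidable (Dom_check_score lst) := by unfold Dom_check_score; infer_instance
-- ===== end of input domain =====

-- B flattens the nested list once, then computes a weighted sum from per-symbol counts over a
-- fixed weights table, instead of A's per-element if/elif chain inside nested loops.

-- ===== PORT A =====
def checkScoreStep (s : Int) (j : String) : Int :=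
  if j = "#" then s + 5
  else if j = "O" then s + 3
  else if j = "X" then s + 1
  else if j = "!" then s - 1
  else if j = "!!" then s - 3
  else if j = "!!!" then s - 5
  else s

def check_score (lst : List (List String)) : Int :=
  let sum := lst.foldl (fun s i => i.foldl checkScoreStep s) 0
  if sum < 0 then 0 else sum

-- ===== PORT B =====
def checkScoreWeights : List (String × Int) :=
  [("#", 5), ("O", 3), ("X", 1), ("!", -1), ("!!", -3), ("!!!", -5)]

def check_score_alt (lst : List (List String)) : Int :=
  let flat := lst.flatMap (fun i => i)
  let total := (checkScoreWeights.map (fun p => p.2 * (flat.count p.1 : Int))).sum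
  max total 0

-- ===== PRECONDITION & SPEC =====
def Spec_check_score (lst : List (List String)) (out : Int) : Prop := out = check_score_alt lst
instance (lst : List (List String)) (out : Int) : Decidable (Spec_check_score lst out) := by unfold Spec_check_score; infer_instance

-- ===== CLAIM (what is proved, stated in full; the proofs are below) =====
def Claim_equal_check_score : Prop := ∀ (lst : List (List String)), Dom_check_score lst → Spec_check_score lst (check_score lst)

-- ===== LEMMAS AND PROOFS =====

-- the per-element weight A's if/elif chain adds
def checkScoreW (j : String) : Int :=
  if j = "#" then 5
  else if j = "O" then 3
  else if j = "X" then 1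
  else if j = "!" then -1
  else if j = "!!" then -3
  else if j = "!!!" then -5
  else 0

theorem checkScoreStep_eq (s : Int) (j : String) : checkScoreStep s j = s + checkScoreW j := by
  unfold checkScoreStep checkScoreW
  split_ifs <;> ring

theorem inner_foldl_eq (xs : List String) (s : Int) :
    xs.foldl checkScoreStep s = s + (xs.map checkScoreW).sum := by
  induction xs generalizing s with
  | nil => simp
  | cons j xs ih => simp [List.foldl_cons, checkScoreStep_eq, ih]; ring

theorem outer_foldl_eq (lst : List (List String)) (s : Int) :
    lst.foldl (fun s i => i.foldl checkScoreStep s) s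
      = s + ((lst.flatMap (fun i => i)).map checkScoreW).sum := by
  induction lst generalizing s with
  | nil => simp
  | cons i lst ih =>
    simp only [List.foldl_cons]
    rw [inner_foldl_eq, ih]
    simp only [List.flatMap_cons, List.map_append, List.sum_append]
    ring

set_option maxHeartbeats 1600000 in
theorem total_eq (flat : List String) :
    (checkScoreWeights.map (fun p => p.2 * (flat.count p.1 : Int))).sum
      = (flat.map checkScoreW).sum := by
  induction flat with
  | nil => simp [checkScoreWeights]
  | cons j flat ih =>
    simp only [checkScoreWeights, List.map_cons, List.map_nil, List.sum_cons,
      List.sum_nil] at ih ⊢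
    by_cases h1 : j = "#"
    · subst h1; simp [checkScoreW]; omega
    by_cases h2 : j = "O"
    · subst h2; simp [checkScoreW]; omega
    by_cases h3 : j = "X"
    · subst h3; simp [checkScoreW]; omega
    by_cases h4 : j = "!"
    · subst h4; simp [checkScoreW]; omega
    by_cases h5 : j = "!!"
    · subst h5; simp [checkScoreW]; omega
    by_cases h6 : j = "!!!"
    · subst h6; simp [checkScoreW]; omega
    simp [checkScoreW, h1, h2, h3, h4, h5, h6]
    omega

theorem check_score_spec : Claim_equal_check_score := by
  intro lst _
  simp only [Spec_check_score, check_score, check_score_alt]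
  rw [outer_foldl_eq, total_eq]
  simp only [zero_add]
  by_cases h : ((lst.flatMap (fun i => i)).map checkScoreW).sum < 0
  · rw [if_pos h, max_eq_right (le_of_lt h)]
  · rw [if_neg h, max_eq_left (not_lt.mp h)]
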